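-- pv_equiv track=rewrite | github.com/CristianoS16/MC102-1s2019 | lab08/lab08.py | ntri
-- ===== SOURCE A (Python) =====
-- def ntri(a):
-- 	cont = 0
-- 	i = 1
-- 	while i < abs(a):        #Acumuladora com a soma de 1 até n, n<a, usada para verificar se o número é triangular
-- 		cont = cont + i
-- 		i = i + 1
-- 		if cont == abs(a):   #Golpe combo, dobro do dano. Pois o numero é triangular
-- 			a = 2*a
-- 			break            #Sai do laço quando encontra a soma que comprova a triangularidade do numero
-- 	return  a			 #Retorna o novo valor de a
-- ===== SOURCE B (Python) =====
-- def ntri(a):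
--     # Closed-form triangular test: |a| is triangular iff 8*|a|+1 is a perfect
--     # square (integer square root via Newton's method, O(log) vs A's O(|a|)).
--     n = 8 * abs(a) + 1
--     x = n
--     y = (x + 1) // 2
--     while y < x:
--         x = y
--         y = (x + n // x) // 2
--     return 2 * a if x * x == n else a
-- ===== Notes on version B (the rewrite author's own statement) =====
-- stated objective: faster
-- what changed: Replaced A's linear summation loop (adding 1+2+... up to |a|) by the closed-form triangular test: |a| is triangular iff 8*|a|+1 is a perfect square, checked with a Newton integer square root.
-- intended difference: For a = 1 and a = -1 (|a| = T_1 = 1 is triangular) A's loop never runs because its guard i < |a| fails immediately, so A returns a undoubled; B returns 2*a, which is the intended value since the function's purpose is to double triangular |a|. — e.g. on ntri(1): A returns 1, B returns 2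
import Mathlib
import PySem

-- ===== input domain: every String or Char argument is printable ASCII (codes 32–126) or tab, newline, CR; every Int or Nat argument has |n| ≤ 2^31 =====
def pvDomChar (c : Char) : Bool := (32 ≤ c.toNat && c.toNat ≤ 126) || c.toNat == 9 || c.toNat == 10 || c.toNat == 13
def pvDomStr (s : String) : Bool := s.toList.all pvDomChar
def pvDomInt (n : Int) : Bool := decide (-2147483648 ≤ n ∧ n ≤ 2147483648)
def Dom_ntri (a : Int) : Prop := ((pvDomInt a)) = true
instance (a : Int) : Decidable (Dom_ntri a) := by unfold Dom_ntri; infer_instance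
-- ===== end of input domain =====

-- B replaces A's O(|a|) summation loop by the closed-form triangular test
-- "8*|a|+1 is a perfect square" via a Newton integer square root (O(log |a|));
-- B doubles a at |a| = 1 (triangular) where A's loop guard skips it: see D_ntri.

-- ===== PORT A =====
-- A's while loop: cont accumulates 1+2+...; on cont == abs(a) return doubled a.
def ntriGo (a cont i : Int) : Int :=
  if i < |a| then
    if cont + i = |a| then 2 * a
    else ntriGo a (cont + i) (i + 1)
  else a
termination_by (|a| - i).toNat
decreasing_by omega

def ntri (a : Int) : Int := ntriGo a 0 1

-- ===== PORT B =====
-- Newton integer-sqrt loop of Source B; all values are nonnegative Python ints,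
-- on which Python's `//` is exactly Nat division.
def ntriAltGo (n x y : Nat) : Nat :=
  if y < x then ntriAltGo n y ((y + n / y) / 2) else x
termination_by x

def ntri_alt (a : Int) : Int :=
  let n : Nat := 8 * a.natAbs + 1
  let x := n
  let y := (x + 1) / 2
  let r := ntriAltGo n x y
  if r * r = n then 2 * a else a

-- ===== PRECONDITION & SPEC =====
-- For a = 1 and a = -1 (|a| = 1 is triangular) A returns a undoubled because its
-- loop guard i < |a| fails immediately; B returns 2*a, the intended value.
def D_ntri (a : Int) : Prop := a = 1 ∨ a = -1
instance (a : Int) : Decidable (D_ntri a) := by unfold D_ntri; infer_instance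

def Spec_ntri (a : Int) (out : Int) : Prop := ¬ D_ntri a → out = ntri_alt a
instance (a : Int) (out : Int) : Decidable (Spec_ntri a out) := by unfold Spec_ntri; infer_instance

def pvDiffWitness_ntri : Int := 1
def pvDiffWitnessOut_ntri : Int × Int := (1, 2)

-- ===== CLAIM (what is proved, stated in full; the proofs are below) =====
def Claim_unchanged_ntri : Prop := ∀ (a : Int), Dom_ntri a → Spec_ntri a (ntri a)
def Claim_changed_ntri : Prop := Dom_ntri (pvDiffWitness_ntri) ∧ D_ntri (pvDiffWitness_ntri) ∧ ntri (pvDiffWitness_ntri) = pvDiffWitnessOut_ntri.1 ∧ ntri_alt (pvDiffWitness_ntri) = pvDiffWitnessOut_ntri.2 ∧ pvDiffWitnessOut_ntri.1 ≠ pvDiffWitnessOut_ntri.2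
def Claim_exact_ntri : Prop := ∀ (a : Int), Dom_ntri a → D_ntri a → ntri a ≠ ntri_alt a

-- ===== LEMMAS AND PROOFS =====

-- T(k-1) + k = T k in Nat.
theorem tri_step (k : Nat) (hk : 1 ≤ k) : (k - 1) * k / 2 + k = k * (k + 1) / 2 := by
  obtain ⟨c, hc⟩ := Nat.even_mul_succ_self k
  have h1 : (k - 1) * k + k = k * k := by
    cases k with
    | zero => omega
    | succ p => simp only [Nat.succ_sub_one]; ring
  have h2 : k * (k + 1) = k * k + k := by ring
  omega

-- Newton step stays ≥ m when n = m*m: x + m*m/x ≥ 2*m for x ≥ 1.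
theorem newton_ge (m x : Nat) (hx : 1 ≤ x) : m ≤ (x + m * m / x) / 2 := by
  have hdm := Nat.div_add_mod (m * m) x
  have hmod : m * m % x < x := Nat.mod_lt _ hx
  set t := m * m / x with ht
  have h2 : 2 * m ≤ x + t := by
    rcases Nat.lt_or_ge (x + t) (2 * m) with h | h
    · exfalso
      have hi : (x : Int) * t + (m * m % x : Nat) = (m : Int) * m := by exact_mod_cast hdm
      have hmi : ((m * m % x : Nat) : Int) < (x : Int) := by exact_mod_cast hmod
      have hx0 : (0 : Int) < x := by exact_mod_cast hx
      have hsum : (x : Int) + t + 1 ≤ 2 * m := by exact_mod_cast (by omega : x + t + 1 ≤ 2 * m)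
      nlinarith [sq_nonneg ((x : Int) - m), mul_le_mul_of_nonneg_left hsum (le_of_lt hx0),
        Int.natCast_nonneg (m * m % x)]
    · exact h
  omega

-- The Newton loop computes m exactly on a perfect square n = m*m (m ≥ 1).
theorem go_sq (m : Nat) (hm1 : 1 ≤ m) : ∀ x y, m ≤ x → y = (x + m * m / x) / 2 →
    ntriAltGo (m * m) x y = m := by
  intro x
  induction x using Nat.strong_induction_on with
  | _ x ih =>
    intro y hx hy
    unfold ntriAltGo
    by_cases hlt : y < x
    · rw [if_pos hlt]
      have hx1 : 1 ≤ x := le_trans hm1 hx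
      have hym : m ≤ y := hy ▸ newton_ge m x hx1
      exact ih y hlt ((y + m * m / y) / 2) hym rfl
    · rw [if_neg hlt]
      have hxy : x ≤ y := le_of_not_gt hlt
      have hx1 : 0 < x := lt_of_lt_of_le hm1 hx
      have h2x : 2 * x ≤ x + m * m / x := by
        have := (Nat.le_div_iff_mul_le (by norm_num : 0 < 2)).mp (hy ▸ hxy)
        omega
      have hxt : x ≤ m * m / x := by omega
      have hxx : x * x ≤ m * m := by
        have := (Nat.le_div_iff_mul_le hx1).mp hxt
        omega
      have : x ≤ m := by nlinarith
      omega

-- If |a| is triangular (T j = |a|) then B doubles a.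
theorem alt_of_tri (a : Int) (j : Nat) (h : j * (j + 1) / 2 = a.natAbs) :
    ntri_alt a = 2 * a := by
  obtain ⟨c, hc⟩ := Nat.even_mul_succ_self j
  have hexp : (2 * j + 1) * (2 * j + 1) = 4 * (j * (j + 1)) + 1 := by ring
  have hsq : 8 * a.natAbs + 1 = (2 * j + 1) * (2 * j + 1) := by omega
  unfold ntri_alt
  simp only [hsq]
  set m := 2 * j + 1 with hm
  have hmm : 1 ≤ m * m := Nat.one_le_iff_ne_zero.mpr (by positivity)
  have hinit : (m * m + 1) / 2 = (m * m + m * m / (m * m)) / 2 := by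
    rw [Nat.div_self hmm]
  rw [hinit, go_sq m (by omega) (m * m) _ (Nat.le_mul_of_pos_left m (by omega)) rfl]
  simp

-- If |a| is not triangular then B returns a unchanged.
theorem alt_of_not (a : Int) (h : ∀ j : Nat, j * (j + 1) / 2 ≠ a.natAbs) :
    ntri_alt a = a := by
  show (if ntriAltGo (8 * a.natAbs + 1) (8 * a.natAbs + 1) ((8 * a.natAbs + 1 + 1) / 2) *
         ntriAltGo (8 * a.natAbs + 1) (8 * a.natAbs + 1) ((8 * a.natAbs + 1 + 1) / 2)
        = 8 * a.natAbs + 1 then 2 * a else a) = a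
  set r := ntriAltGo (8 * a.natAbs + 1) (8 * a.natAbs + 1) ((8 * a.natAbs + 1 + 1) / 2) with hr
  rw [if_neg]
  intro hsq
  have hodd : Odd r := by
    have : Odd (r * r) := by rw [hsq]; exact ⟨4 * a.natAbs, by ring⟩
    exact (Nat.odd_mul.mp this).1
  obtain ⟨j, hj⟩ := hodd
  rw [hj] at hsq
  have hexp : (2 * j + 1) * (2 * j + 1) = 4 * (j * (j + 1)) + 1 := by ring
  exact h j (by omega)

-- T is strictly increasing past j = 2.
theorem tri_gt (j : Nat) (hj : 2 ≤ j) : j < j * (j + 1) / 2 := by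
  have : 3 * j ≤ j * (j + 1) := by nlinarith
  omega

-- A's loop doubles a when some T j = |a| with j ≥ 2 is still ahead.
theorem A_go_pos (a : Int) : ∀ (j k : Nat), 1 ≤ k → k ≤ j → 2 ≤ j →
    j * (j + 1) / 2 = a.natAbs →
    ntriGo a (((k - 1) * k / 2 : Nat) : Int) (k : Int) = 2 * a := by
  intro j k
  induction hd : j - k using Nat.strong_induction_on generalizing k with
  | _ d ih =>
    intro hk1 hkj hj2 hT
    have hjN : j < a.natAbs := hT ▸ tri_gt j hj2
    have hkN : (k : Int) < |a| := by
      rw [Int.abs_eq_natAbs]; exact_mod_cast lt_of_le_of_lt hkj hjN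
    unfold ntriGo
    rw [if_pos hkN]
    have hcont : (((k - 1) * k / 2 : Nat) : Int) + (k : Int) = ((k * (k + 1) / 2 : Nat) : Int) := by
      rw [← tri_step k hk1]; push_cast; ring
    by_cases hfire : (((k - 1) * k / 2 : Nat) : Int) + (k : Int) = |a|
    · rw [if_pos hfire]
    · rw [if_neg hfire]
      have hknej : k ≠ j := by
        intro he
        exact hfire (by rw [hcont, he, hT, Int.abs_eq_natAbs])
      have hrec := ih (j - (k + 1)) (by omega) (k + 1) rfl (by omega) (by omega) hj2 hT
      have hshift : (((k + 1 - 1) * (k + 1) / 2 : Nat) : Int)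
          = (((k - 1) * k / 2 : Nat) : Int) + (k : Int) := by
        simp only [Nat.add_sub_cancel]; rw [hcont]
      rw [hshift] at hrec
      have hcst : ((k : Int) + 1) = ((k + 1 : Nat) : Int) := by push_cast; ring
      rw [hcst]
      exact hrec

-- A's loop leaves a alone when no T j = |a| lies ahead.
theorem A_go_neg (a : Int) : ∀ (k : Nat), 1 ≤ k →
    (∀ j : Nat, k ≤ j → j * (j + 1) / 2 ≠ a.natAbs) →
    ntriGo a (((k - 1) * k / 2 : Nat) : Int) (k : Int) = a := by
  intro k
  induction hd : a.natAbs - k using Nat.strong_induction_on generalizing k with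
  | _ d ih =>
    intro hk1 hnh
    unfold ntriGo
    by_cases hkN : (k : Int) < |a|
    · rw [if_pos hkN]
      have hcont : (((k - 1) * k / 2 : Nat) : Int) + (k : Int) = ((k * (k + 1) / 2 : Nat) : Int) := by
        rw [← tri_step k hk1]; push_cast; ring
      have hfire : ¬((((k - 1) * k / 2 : Nat) : Int) + (k : Int) = |a|) := by
        rw [hcont, Int.abs_eq_natAbs]
        intro he
        exact hnh k le_rfl (by exact_mod_cast he)
      rw [if_neg hfire]
      have hkN' : k < a.natAbs := by
        rw [Int.abs_eq_natAbs] at hkN; exact_mod_cast hkN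
      have hrec := ih (a.natAbs - (k + 1)) (by omega) (k + 1) rfl (by omega)
        (fun j hj => hnh j (by omega))
      have hshift : (((k + 1 - 1) * (k + 1) / 2 : Nat) : Int)
          = (((k - 1) * k / 2 : Nat) : Int) + (k : Int) := by
        simp only [Nat.add_sub_cancel]; rw [hcont]
      rw [hshift] at hrec
      have hcst : ((k : Int) + 1) = ((k + 1 : Nat) : Int) := by push_cast; ring
      rw [hcst]
      exact hrec
    · rw [if_neg hkN]

-- ===== VERDICT (by name: the statement is the Claim_ definition above) =====
-- Evaluation helpers for the small concrete inputs 0, 1, -1.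
theorem ntri_eval_small (a : Int) (h : a.natAbs ≤ 1) : ntri a = a := by
  have hlt : ¬((1 : Int) < |a|) := by rw [Int.abs_eq_natAbs]; omega
  unfold ntri
  rw [ntriGo, if_neg hlt]

theorem altgo_one : ntriAltGo 1 1 1 = 1 := by rw [ntriAltGo]; norm_num

theorem altgo_nine : ntriAltGo 9 9 5 = 3 := by
  have e3 : ntriAltGo 9 3 3 = 3 := by rw [ntriAltGo]; norm_num
  have e2 : ntriAltGo 9 5 3 = 3 := by rw [ntriAltGo]; norm_num [e3]
  rw [ntriAltGo]; norm_num [e2]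

theorem alt_eval_one (a : Int) (h : a.natAbs = 1) : ntri_alt a = 2 * a := by
  unfold ntri_alt
  rw [h]
  norm_num [altgo_nine]

theorem ntri_spec : Claim_unchanged_ntri := by
  intro a _ hD
  by_cases ha0 : a = 0
  · subst ha0
    rw [ntri_eval_small 0 (by decide)]
    show (0 : Int) = if ntriAltGo 1 1 1 * ntriAltGo 1 1 1 = 1 then 2 * (0 : Int) else 0
    norm_num [altgo_one]
  have hN1 : a.natAbs ≠ 1 := by
    intro h
    rcases Int.natAbs_eq a with he | he <;> rw [h] at he <;> simp_all [D_ntri]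
  have hN2 : 2 ≤ a.natAbs := by
    have : a.natAbs ≠ 0 := fun h => ha0 (Int.natAbs_eq_zero.mp h)
    omega
  by_cases htri : ∃ j : Nat, j * (j + 1) / 2 = a.natAbs
  · obtain ⟨j, hj⟩ := htri
    have hj2 : 2 ≤ j := by
      rcases Nat.lt_or_ge j 2 with h | h
      · interval_cases j <;> omega
      · exact h
    have hA : ntri a = 2 * a := by
      have := A_go_pos a j 1 le_rfl (by omega) hj2 hj
      simpa [ntri] using this
    rw [hA, alt_of_tri a j hj]
  · have hA : ntri a = a := by
      have := A_go_neg a 1 le_rfl (fun j _ hj => htri ⟨j, hj⟩)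
      simpa [ntri] using this
    rw [hA, alt_of_not a (fun j hj => htri ⟨j, hj⟩)]

theorem ntri_changed : Claim_changed_ntri := by
  unfold Claim_changed_ntri
  refine ⟨by decide, by decide, ?_, ?_, by decide⟩
  · exact ntri_eval_small 1 (by decide)
  · exact alt_eval_one 1 (by decide)

theorem ntri_tight : Claim_exact_ntri := by
  intro a _ hD
  rcases hD with h | h <;> subst h <;>
    rw [ntri_eval_small _ (by decide), alt_eval_one _ (by decide)] <;> norm_num
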